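-- pv_equiv track=rewrite | github.com/cua-verse/agenthle-base | tasks/hardware/Embedded_UART/eval.py | check_pin_assignments
-- ===== SOURCE A (Python) =====
-- def check_pin_assignments(ioc_text):
--     """Check that PA2/PA3 are assigned to USART2 and PA5 is GPIO output.
--
--     Returns dict with:
--         'pa2_usart2_tx': bool
--         'pa3_usart2_rx': bool
--         'pa5_gpio_output': bool
--         'all_pass': bool
--     """
--     results = {
--         "pa2_usart2_tx": False,
--         "pa3_usart2_rx": False,
--         "pa5_gpio_output": False,
--         "all_pass": False,
--     }
--
--     for line in ioc_text.split('\n'):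
--         line = line.strip()
--         if line == "PA2.Signal=USART2_TX":
--             results["pa2_usart2_tx"] = True
--         elif line == "PA3.Signal=USART2_RX":
--             results["pa3_usart2_rx"] = True
--         elif line == "PA5.Signal=GPIO_Output":
--             results["pa5_gpio_output"] = True
--
--     results["all_pass"] = all([
--         results["pa2_usart2_tx"],
--         results["pa3_usart2_rx"],
--         results["pa5_gpio_output"],
--     ])
--
--     return results
-- ===== SOURCE B (Python) =====
-- def check_pin_assignments(ioc_text):
--     """Check that PA2/PA3 are assigned to USART2 and PA5 is GPIO output."""
--     assignments = set()
--     for line in ioc_text.split('\n'):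
--         key, sep, value = line.strip().partition('=')
--         if sep:
--             assignments.add((key, value))
--     pa2 = ("PA2.Signal", "USART2_TX") in assignments
--     pa3 = ("PA3.Signal", "USART2_RX") in assignments
--     pa5 = ("PA5.Signal", "GPIO_Output") in assignments
--     return {
--         "pa2_usart2_tx": pa2,
--         "pa3_usart2_rx": pa3,
--         "pa5_gpio_output": pa5,
--         "all_pass": pa2 and pa3 and pa5,
--     }
-- ===== Notes on version B (the rewrite author's own statement) =====
-- stated objective: alternative
-- what changed: Instead of comparing each stripped line against three whole-line literals in an if/elif chain mutating a dict, B parses every line into a structured (key, value) pair by partitioning at the first equals sign, builds a set of assignment pairs, and answers each flag as a structured pair-membership query; whole-line equality is recovered because reconstruction from a first-separator split is unambiguous.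
import Mathlib
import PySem

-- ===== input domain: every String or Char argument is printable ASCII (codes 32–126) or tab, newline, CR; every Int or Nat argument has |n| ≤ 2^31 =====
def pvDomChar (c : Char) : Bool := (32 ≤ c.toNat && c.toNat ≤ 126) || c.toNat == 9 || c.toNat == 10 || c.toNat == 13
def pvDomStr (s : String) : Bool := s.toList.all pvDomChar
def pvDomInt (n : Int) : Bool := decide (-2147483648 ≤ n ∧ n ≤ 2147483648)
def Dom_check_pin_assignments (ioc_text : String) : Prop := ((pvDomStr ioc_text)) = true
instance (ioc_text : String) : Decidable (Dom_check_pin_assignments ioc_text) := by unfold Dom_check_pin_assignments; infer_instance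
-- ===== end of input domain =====

-- B parses each line into a structured (key, value) pair via partition('=') and answers
-- the three flags as queries on that assignment set, instead of A's whole-line if/elif
-- chain mutating a dict (objective: alternative).

-- ===== PORT A =====
-- the for-loop over ioc_text.split('\n'), updating the results dict
def cpaLoop (lines : List String) (d : PySem.Dict String Bool) : PySem.Dict String Bool :=
  lines.foldl (fun d line =>
    let line := PySem.Str.strip line
    if line = "PA2.Signal=USART2_TX" then d.insert "pa2_usart2_tx" true
    else if line = "PA3.Signal=USART2_RX" then d.insert "pa3_usart2_rx" true
    else if line = "PA5.Signal=GPIO_Output" then d.insert "pa5_gpio_output" true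
    else d) d

def check_pin_assignments (ioc_text : String) : List (String × Bool) :=
  let results : PySem.Dict String Bool :=
    ((((PySem.Dict.empty).insert "pa2_usart2_tx" false).insert "pa3_usart2_rx" false).insert
        "pa5_gpio_output" false).insert "all_pass" false
  let results := cpaLoop ((PySem.Chars.splitOn ioc_text.toList ['\n']).map String.ofList) results
  let allp := [results.getD "pa2_usart2_tx" false, results.getD "pa3_usart2_rx" false,
               results.getD "pa5_gpio_output" false].all id
  let results := results.insert "all_pass" allp
  results.items

-- ===== PORT B =====
-- hand port of str.partition('='): exact — splits at the FIRST '=', middle component is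
-- whether a '=' was found (Python: the separator string is truthy iff found)
def pyPartitionEq : List Char → List Char × Bool × List Char
  | [] => ([], false, [])
  | c :: rest =>
    if c = '=' then ([], true, rest)
    else
      let r := pyPartitionEq rest
      (c :: r.1, r.2.1, r.2.2)

-- B's loop: build the set of (key, value) assignment pairs
def cpaParse (lines : List String) (s : PySem.Set (String × String)) :
    PySem.Set (String × String) :=
  lines.foldl (fun s line =>
    let r := pyPartitionEq (PySem.Str.strip line).toList
    if r.2.1 then PySem.Set.add s (String.ofList r.1, String.ofList r.2.2) else s) s

def check_pin_assignments_alt (ioc_text : String) : List (String × Bool) :=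
  let asg := cpaParse ((PySem.Chars.splitOn ioc_text.toList ['\n']).map String.ofList)
    PySem.Set.empty
  let pa2 := PySem.Set.contains asg ("PA2.Signal", "USART2_TX")
  let pa3 := PySem.Set.contains asg ("PA3.Signal", "USART2_RX")
  let pa5 := PySem.Set.contains asg ("PA5.Signal", "GPIO_Output")
  [("pa2_usart2_tx", pa2), ("pa3_usart2_rx", pa3), ("pa5_gpio_output", pa5),
   ("all_pass", pa2 && pa3 && pa5)]

-- ===== PRECONDITION & SPEC =====
def Spec_check_pin_assignments (ioc_text : String) (out : List (String × Bool)) : Prop := out = check_pin_assignments_alt ioc_text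
instance (ioc_text : String) (out : List (String × Bool)) : Decidable (Spec_check_pin_assignments ioc_text out) := by unfold Spec_check_pin_assignments; infer_instance

-- ===== CLAIM =====
def Claim_equal_check_pin_assignments : Prop := ∀ (ioc_text : String), Dom_check_pin_assignments ioc_text → Spec_check_pin_assignments ioc_text (check_pin_assignments ioc_text)

-- ===== LEMMAS AND PROOFS =====

-- the results dict with given flag values (all_pass still False), as during A's loop
def cpaDict (b2 b3 b5 : Bool) : PySem.Dict String Bool :=
  PySem.Dict.mk [("pa2_usart2_tx", b2), ("pa3_usart2_rx", b3),
                 ("pa5_gpio_output", b5), ("all_pass", false)]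

lemma cpaLoop_dict (ls : List String) (b2 b3 b5 : Bool) :
    cpaLoop ls (cpaDict b2 b3 b5) =
      cpaDict (b2 || (ls.map PySem.Str.strip).contains "PA2.Signal=USART2_TX")
              (b3 || (ls.map PySem.Str.strip).contains "PA3.Signal=USART2_RX")
              (b5 || (ls.map PySem.Str.strip).contains "PA5.Signal=GPIO_Output") := by
  induction ls generalizing b2 b3 b5 with
  | nil => simp [cpaLoop]
  | cons h t ih =>
    simp only [cpaLoop, List.foldl_cons, List.map_cons, List.contains_cons] at *
    by_cases h2 : PySem.Str.strip h = "PA2.Signal=USART2_TX"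
    · have : (cpaDict b2 b3 b5).insert "pa2_usart2_tx" true = cpaDict true b3 b5 := rfl
      simp [h2, this, ih]
    · by_cases h3 : PySem.Str.strip h = "PA3.Signal=USART2_RX"
      · have : (cpaDict b2 b3 b5).insert "pa3_usart2_rx" true = cpaDict b2 true b5 := rfl
        simp [h3, this, ih]
      · by_cases h5 : PySem.Str.strip h = "PA5.Signal=GPIO_Output"
        · have : (cpaDict b2 b3 b5).insert "pa5_gpio_output" true = cpaDict b2 b3 true := rfl
          simp [h5, this, ih]
        · have e2 : ("PA2.Signal=USART2_TX" == PySem.Str.strip h) = false := by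
            simp [Ne.symm h2]
          have e3 : ("PA3.Signal=USART2_RX" == PySem.Str.strip h) = false := by
            simp [Ne.symm h3]
          have e5 : ("PA5.Signal=GPIO_Output" == PySem.Str.strip h) = false := by
            simp [Ne.symm h5]
          simp [h2, h3, h5, ih, e2, e3, e5]

-- if partition found a '=', the input is key ++ '=' ++ value
lemma partition_recon (s : List Char) (h : (pyPartitionEq s).2.1 = true) :
    s = (pyPartitionEq s).1 ++ '=' :: (pyPartitionEq s).2.2 := by
  induction s with
  | nil => simp [pyPartitionEq] at h
  | cons c rest ih =>
    by_cases hc : c = '='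
    · simp [pyPartitionEq, hc]
    · simp only [pyPartitionEq, if_neg hc] at h ⊢
      simpa using ih h

-- partitioning key ++ '=' ++ value recovers (key, value) when key has no '='
lemma partition_of_append (k v : List Char) (hk : '=' ∉ k) :
    pyPartitionEq (k ++ '=' :: v) = (k, true, v) := by
  induction k with
  | nil => simp [pyPartitionEq]
  | cons c rest ih =>
    have hc : c ≠ '=' := by intro h; exact hk (by simp [h])
    have hrest : '=' ∉ rest := fun h => hk (by simp [h])
    simp [pyPartitionEq, hc, ih hrest]

-- membership in B's parsed assignment set = A-style whole-line membership
lemma contains_cpaParse (ls : List String) (s0 : PySem.Set (String × String))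
    (K V : String) (hk : '=' ∉ K.toList) :
    PySem.Set.contains (cpaParse ls s0) (K, V) =
      (PySem.Set.contains s0 (K, V) ||
        (ls.map PySem.Str.strip).contains (String.ofList (K.toList ++ '=' :: V.toList))) := by
  induction ls generalizing s0 with
  | nil => simp [cpaParse]
  | cons h t ih =>
    simp only [cpaParse, List.foldl_cons, List.map_cons, List.contains_cons] at *
    by_cases hq : (PySem.Str.strip h).toList = K.toList ++ '=' :: V.toList
    · -- the line is exactly "K=V": flag fires and the added pair is (K, V)
      have hp : pyPartitionEq (PySem.Str.strip h).toList = (K.toList, true, V.toList) := by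
        rw [hq]; exact partition_of_append _ _ hk
      have hpair : (String.ofList (pyPartitionEq (PySem.Str.strip h).toList).1,
          String.ofList (pyPartitionEq (PySem.Str.strip h).toList).2.2) = (K, V) := by
        rw [hp]; simp [String.ofList_toList]
      have hflag : (pyPartitionEq (PySem.Str.strip h).toList).2.1 = true := by rw [hp]
      have hcadd : PySem.Set.contains
          (PySem.Set.add s0 (String.ofList (pyPartitionEq (PySem.Str.strip h).toList).1,
            String.ofList (pyPartitionEq (PySem.Str.strip h).toList).2.2)) (K, V) = true := by
        have hm : (K, V) ∈ PySem.Set.add s0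
            (String.ofList (pyPartitionEq (PySem.Str.strip h).toList).1,
             String.ofList (pyPartitionEq (PySem.Str.strip h).toList).2.2) :=
          (PySem.Set.mem_add _ _ _).mpr (Or.inr hpair.symm)
        simpa [PySem.Set.contains] using hm
      have hhd : (String.ofList (K.toList ++ '=' :: V.toList) == PySem.Str.strip h) = true := by
        have : String.ofList (K.toList ++ '=' :: V.toList) = PySem.Str.strip h := by
          rw [← hq]; exact String.ofList_toList
        simp [this]
      rw [if_pos hflag, ih, hcadd, hhd]
      simp
    · -- the line is not "K=V": neither side gains a match from it
      have hhd : (String.ofList (K.toList ++ '=' :: V.toList) == PySem.Str.strip h) = false := by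
        apply beq_eq_false_iff_ne.mpr
        intro he
        exact hq (by rw [← he, String.toList_ofList])
      by_cases hf : (pyPartitionEq (PySem.Str.strip h).toList).2.1 = true
      · have hne : ((K, V) : String × String) ≠
            (String.ofList (pyPartitionEq (PySem.Str.strip h).toList).1,
             String.ofList (pyPartitionEq (PySem.Str.strip h).toList).2.2) := by
          intro he
          have hK : (pyPartitionEq (PySem.Str.strip h).toList).1 = K.toList := by
            have h1 : K = String.ofList (pyPartitionEq (PySem.Str.strip h).toList).1 :=
              congrArg Prod.fst he
            rw [h1, String.toList_ofList]
          have hV : (pyPartitionEq (PySem.Str.strip h).toList).2.2 = V.toList := by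
            have h1 : V = String.ofList (pyPartitionEq (PySem.Str.strip h).toList).2.2 :=
              congrArg Prod.snd he
            rw [h1, String.toList_ofList]
          have hp : pyPartitionEq (PySem.Str.strip h).toList = (K.toList, true, V.toList) := by
            rcases hr : pyPartitionEq (PySem.Str.strip h).toList with ⟨a, b, c⟩
            rw [hr] at hK hV hf; simp only at hK hV hf; simp [hK, hV, hf]
          have hrec := partition_recon (PySem.Str.strip h).toList (by rw [hp])
          rw [hp] at hrec
          exact hq hrec
        have hcadd : PySem.Set.contains
            (PySem.Set.add s0 (String.ofList (pyPartitionEq (PySem.Str.strip h).toList).1,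
              String.ofList (pyPartitionEq (PySem.Str.strip h).toList).2.2)) (K, V)
            = PySem.Set.contains s0 (K, V) := by
          have hne' := hne
          simp only [PySem.Str.toList_strip] at hne'
          simp [PySem.Set.contains, PySem.Set.mem_add, hne']
        rw [if_pos hf, ih, hcadd, hhd]
        simp
      · rw [if_neg hf, ih, hhd]
        simp

-- ===== VERDICT =====
theorem check_pin_assignments_spec : Claim_equal_check_pin_assignments := by
  intro ioc_text _
  unfold Spec_check_pin_assignments check_pin_assignments check_pin_assignments_alt
  have h0 : ((((PySem.Dict.empty).insert "pa2_usart2_tx" false).insert "pa3_usart2_rx"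
      false).insert "pa5_gpio_output" false).insert "all_pass" false
      = cpaDict false false false := rfl
  have c2 := contains_cpaParse ((PySem.Chars.splitOn ioc_text.toList ['\n']).map String.ofList)
    PySem.Set.empty "PA2.Signal" "USART2_TX" (by decide)
  have c3 := contains_cpaParse ((PySem.Chars.splitOn ioc_text.toList ['\n']).map String.ofList)
    PySem.Set.empty "PA3.Signal" "USART2_RX" (by decide)
  have c5 := contains_cpaParse ((PySem.Chars.splitOn ioc_text.toList ['\n']).map String.ofList)
    PySem.Set.empty "PA5.Signal" "GPIO_Output" (by decide)
  have e2 : String.ofList ("PA2.Signal".toList ++ '=' :: "USART2_TX".toList)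
      = "PA2.Signal=USART2_TX" := rfl
  have e3 : String.ofList ("PA3.Signal".toList ++ '=' :: "USART2_RX".toList)
      = "PA3.Signal=USART2_RX" := rfl
  have e5 : String.ofList ("PA5.Signal".toList ++ '=' :: "GPIO_Output".toList)
      = "PA5.Signal=GPIO_Output" := rfl
  rw [e2] at c2; rw [e3] at c3; rw [e5] at c5
  have hemp : ∀ p : String × String, PySem.Set.contains PySem.Set.empty p = false := by
    intro p; rfl
  rw [hemp] at c2 c3 c5
  simp only [Bool.false_or] at c2 c3 c5
  simp only [h0, cpaLoop_dict, Bool.false_or, c2, c3, c5]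
  generalize (List.map PySem.Str.strip
      (List.map String.ofList (PySem.Chars.splitOn ioc_text.toList ['\n']))).contains
      "PA2.Signal=USART2_TX" = b2
  generalize (List.map PySem.Str.strip
      (List.map String.ofList (PySem.Chars.splitOn ioc_text.toList ['\n']))).contains
      "PA3.Signal=USART2_RX" = b3
  generalize (List.map PySem.Str.strip
      (List.map String.ofList (PySem.Chars.splitOn ioc_text.toList ['\n']))).contains
      "PA5.Signal=GPIO_Output" = b5
  cases b2 <;> cases b3 <;> cases b5 <;> rfl
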